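-- pv_equiv track=rewrite | github.com/pcomi/PYTHON | homework3.py | Count
-- ===== SOURCE A (Python) =====
-- def Count(list):
--
--     a = set()
--     b = set()
--
--     for word in list:
--         if word in a:
--             b.add(word)
--         else:
--             a.add(word)
--
--     return (len(a), len(b))
-- ===== SOURCE B (Python) =====
-- def Count(list):
--     counts = {}
--     for w in list:
--         counts[w] = counts.get(w, 0) + 1
--     return (len(counts), sum(1 for v in counts.values() if v > 1))
-- ===== Notes on version B (the rewrite author's own statement) =====
-- stated objective: idiomatic
-- what changed: Replaces A's two-set membership-branching pass (seen/repeated sets) with a single frequency table built in one pass, the result then read off as (number of keys, number of values exceeding 1).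
import Mathlib
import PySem

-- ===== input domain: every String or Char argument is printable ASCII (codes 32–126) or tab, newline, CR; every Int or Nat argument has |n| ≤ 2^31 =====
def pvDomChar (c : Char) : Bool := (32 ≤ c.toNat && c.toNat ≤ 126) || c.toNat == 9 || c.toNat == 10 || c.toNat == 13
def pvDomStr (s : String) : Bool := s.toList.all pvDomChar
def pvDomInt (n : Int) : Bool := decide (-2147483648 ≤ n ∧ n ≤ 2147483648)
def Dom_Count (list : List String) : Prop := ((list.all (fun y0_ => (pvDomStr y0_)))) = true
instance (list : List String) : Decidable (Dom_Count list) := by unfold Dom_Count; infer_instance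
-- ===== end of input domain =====

-- B replaces A's two-set membership-branching pass with a frequency table read off afterwards (idiomatic).

-- ===== PORT A =====
-- a = set(); b = set(); for word in list: if word in a: b.add(word) else: a.add(word); return (len(a), len(b))
def Count (list : List String) : Int × Int :=
  let ab := list.foldl
    (fun (ab : PySem.Set String × PySem.Set String) word =>
      if PySem.Set.contains ab.1 word then (ab.1, PySem.Set.add ab.2 word)
      else (PySem.Set.add ab.1 word, ab.2))
    (PySem.Set.empty, PySem.Set.empty)
  (PySem.Set.len ab.1, PySem.Set.len ab.2)

-- ===== PORT B =====
-- counts = {}; for w in list: counts[w] = counts.get(w, 0) + 1; return (len(counts), sum(1 for v in counts.values() if v > 1))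
def Count_alt (list : List String) : Int × Int :=
  let counts := list.foldl (fun (d : PySem.Dict String Int) w => d.insert w (d.getD w 0 + 1)) PySem.Dict.empty
  ((PySem.Dict.size counts : Int),
   (PySem.Dict.values counts).foldl (fun acc v => if 1 < v then acc + 1 else acc) (0 : Int))

-- ===== PRECONDITION & SPEC =====
def Spec_Count (list : List String) (out : Int × Int) : Prop := out = Count_alt list
instance (list : List String) (out : Int × Int) : Decidable (Spec_Count list out) := by unfold Spec_Count; infer_instance

-- ===== CLAIM (what is proved, stated in full; the proofs are below) =====
def Claim_equal_Count : Prop := ∀ (list : List String), Dom_Count list → Spec_Count list (Count list)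

-- ===== LEMMAS AND PROOFS =====

-- the loop body of A
def pvStepA (ab : PySem.Set String × PySem.Set String) (word : String) :
    PySem.Set String × PySem.Set String :=
  if PySem.Set.contains ab.1 word then (ab.1, PySem.Set.add ab.2 word)
  else (PySem.Set.add ab.1 word, ab.2)

-- invariant of A's loop, generalised over an abstract count of the already-processed prefix
theorem pvLoopA_inv (l : List String) (a b : PySem.Set String) (cnt : String → Nat)
    (ha : ∀ w, w ∈ a ↔ 1 ≤ cnt w) (hb : ∀ w, w ∈ b ↔ 2 ≤ cnt w) (hbn : b.Nodup) :
    (∀ w, w ∈ (l.foldl pvStepA (a, b)).1 ↔ 1 ≤ cnt w + l.count w) ∧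
    (∀ w, w ∈ (l.foldl pvStepA (a, b)).2 ↔ 2 ≤ cnt w + l.count w) ∧
    (l.foldl pvStepA (a, b)).2.Nodup := by
  induction l generalizing a b cnt with
  | nil =>
    simp only [List.foldl_nil, List.count_nil]
    exact ⟨by simpa using ha, by simpa using hb, hbn⟩
  | cons x l ih =>
    have hcnt : ∀ w, cnt w + (x :: l).count w
        = (fun y => cnt y + if y = x then 1 else 0) w + l.count w := by
      intro w
      rcases eq_or_ne w x with h | h
      · subst h; simp; omega
      · simp [h, Ne.symm h]
    simp only [List.foldl_cons]
    by_cases hx : x ∈ a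
    · have h1 : 1 ≤ cnt x := (ha x).mp hx
      have := ih a (PySem.Set.add b x) (fun y => cnt y + if y = x then 1 else 0)
        (by intro w
            rcases eq_or_ne w x with h | h
            · simp [h, hx]
            · simp [h, ha w])
        (by intro w
            rcases eq_or_ne w x with h | h
            · simp [h, PySem.Set.mem_add]; omega
            · simp [PySem.Set.mem_add, h, hb w])
        (PySem.Set.nodup_add b x hbn)
      simpa [pvStepA, hx, hcnt] using this
    · have h0 : cnt x = 0 := by
        have := (ha x).not.mp hx; omega
      have := ih (PySem.Set.add a x) b (fun y => cnt y + if y = x then 1 else 0)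
        (by intro w
            rcases eq_or_ne w x with h | h
            · simp [h, PySem.Set.mem_add]
            · simp [PySem.Set.mem_add, h, ha w])
        (by intro w
            rcases eq_or_ne w x with h | h
            · simp [h, hb x, h0]
            · simp [h, hb w])
        hbn
      simpa [pvStepA, hx, hcnt] using this

-- counting fold over values = length of the filtered list
theorem pvFoldCount (l : List Int) (acc : Int) :
    l.foldl (fun acc v => if 1 < v then acc + 1 else acc) acc
      = acc + ((l.filter (fun v => decide (1 < v))).length : Int) := by
  induction l generalizing acc with
  | nil => simp
  | cons x l ih =>
    by_cases h : 1 < x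
    · simp [h, ih]; omega
    · simp [h, ih]

-- A's first component is just ordered dedup
theorem pvLoopA_fst (l : List String) (a b : PySem.Set String) :
    (l.foldl pvStepA (a, b)).1 = PySem.Set.update a l := by
  induction l generalizing a b with
  | nil => simp [PySem.Set.update_nil]
  | cons x l ih =>
    by_cases hx : x ∈ a
    · simp [pvStepA, hx, PySem.Set.update_cons, ih]
    · simp [pvStepA, hx, PySem.Set.update_cons, ih]

theorem Count_eq (list : List String) : Count list = Count_alt list := by
  obtain ⟨h1, h2, hbn⟩ := pvLoopA_inv list PySem.Set.empty PySem.Set.empty (fun _ => 0)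
    (by simp [PySem.Set.empty]) (by simp [PySem.Set.empty]) (by simp [PySem.Set.empty])
  have hfst : (list.foldl pvStepA (PySem.Set.empty, PySem.Set.empty)).1
      = PySem.Set.ofList list := by
    rw [pvLoopA_fst]
    simp [PySem.Set.empty, PySem.Set.update_nil_left]
  have hperm : ((list.foldl pvStepA (PySem.Set.empty, PySem.Set.empty)).2).Perm
      ((PySem.Set.ofList list).filter (fun k => decide (1 < (List.count k list : Int)))) := by
    refine (List.perm_ext_iff_of_nodup hbn ((PySem.Set.nodup_ofList list).filter _)).mpr ?_
    intro w
    have hm := h2 w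
    simp only [Nat.zero_add] at hm
    rw [hm]
    simp only [List.mem_filter, PySem.Set.mem_ofList, decide_eq_true_eq]
    constructor
    · intro h
      refine ⟨List.count_pos_iff.mp (by omega), ?_⟩
      exact_mod_cast (by omega : 1 < list.count w)
    · rintro ⟨hmem, hlt⟩
      have : 1 < list.count w := by exact_mod_cast hlt
      omega
  have hctr := PySem.Dict.foldl_insert_getD_add_one_eq_counter (κ := String) list
  have hitems := PySem.Dict.items_counter list

  unfold Count Count_alt
  simp only [hctr]
  have hsize : (PySem.Dict.size (PySem.Dict.counter list) : Int)
      = ((PySem.Set.ofList list).length : Int) := by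
    simp [PySem.Dict.size, hitems]
  have hvals : PySem.Dict.values (PySem.Dict.counter list)
      = (PySem.Set.ofList list).map (fun k => (List.count k list : Int)) := by
    simp [PySem.Dict.values, hitems]
  refine Prod.ext ?_ ?_
  · show PySem.Set.len ((list.foldl pvStepA (PySem.Set.empty, PySem.Set.empty)).1) = _
    rw [hfst, hsize]
    simp [PySem.Set.len]
  · show PySem.Set.len ((list.foldl pvStepA (PySem.Set.empty, PySem.Set.empty)).2) = _
    rw [hvals, pvFoldCount, List.filter_map, List.length_map]
    simp only [PySem.Set.len, hperm.length_eq, zero_add]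
    refine congrArg _ (congrArg List.length (List.filter_congr ?_))
    intro k _
    simp [Function.comp]

-- ===== VERDICT (by name: the statement is the Claim_ definition above) =====
theorem Count_spec : Claim_equal_Count := by
  intro list _
  show Count list = Count_alt list
  exact Count_eq list
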